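-- pv_equiv track=rewrite | github.com/seiichikick0404/coding-problems | practice/B - Bombs.py | explode_bombs
-- ===== SOURCE A (Python) =====
-- def explode_bombs(row, col, grid):
--     # 爆発の影響を受けるマスを記録するためのセット
--     to_explode = set()
--
--     # 各爆弾の位置と威力を確認し、影響範囲をセットに追加
--     for i in range(row):
--         for j in range(col):
--             if grid[i][j].isdigit():
--                 power = int(grid[i][j])
--                 for di in range(-power, power + 1):
--                     for dj in range(abs(di) - power, power - abs(di) + 1):
--                         ni, nj = i + di, j + dj
--                         if 0 <= ni < row and 0 <= nj < col:
--                             to_explode.add((ni, nj))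
--
--     # 爆発の影響を受けるマスを空きマスに更新
--     for i, j in to_explode:
--         grid[i][j] = '.'
--
--     return grid
-- ===== SOURCE B (Python) =====
-- def explode_bombs(row, col, grid):
--     # One pass collects the bombs from the original grid; then each cell is
--     # tested against the bomb table (Manhattan distance <= power).
--     # Mutates grid in place (same as the original) and returns it.
--     bombs = []
--     for i in range(row):
--         for j in range(col):
--             if grid[i][j].isdigit():
--                 bombs.append((i, j, int(grid[i][j])))
--     for i in range(row):
--         for j in range(col):
--             if any(abs(i - bi) + abs(j - bj) <= p for bi, bj, p in bombs):
--                 grid[i][j] = '.'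
--     return grid
-- ===== Notes on version B (the rewrite author's own statement) =====
-- stated objective: alternative
-- what changed: Inverts the control flow: instead of expanding each bomb's diamond cell-by-cell into a set and then clearing the set, B collects the bomb table in one pass and then tests every grid cell against it by Manhattan distance.
import Mathlib
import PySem

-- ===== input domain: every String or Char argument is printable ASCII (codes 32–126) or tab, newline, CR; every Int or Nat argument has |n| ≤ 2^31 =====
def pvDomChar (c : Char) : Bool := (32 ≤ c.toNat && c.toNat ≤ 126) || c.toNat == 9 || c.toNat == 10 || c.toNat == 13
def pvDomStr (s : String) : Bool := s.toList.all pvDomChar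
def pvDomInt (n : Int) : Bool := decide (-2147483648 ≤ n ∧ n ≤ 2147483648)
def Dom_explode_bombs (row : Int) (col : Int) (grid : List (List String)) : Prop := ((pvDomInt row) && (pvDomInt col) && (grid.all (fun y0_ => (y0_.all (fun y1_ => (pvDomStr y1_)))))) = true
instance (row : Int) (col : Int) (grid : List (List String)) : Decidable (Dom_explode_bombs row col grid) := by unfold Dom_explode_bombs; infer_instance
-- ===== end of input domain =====

-- B inverts A's control flow: A expands each bomb's diamond into a set of cells and then clears that
-- set; B collects the bomb table in one pass and then tests every grid cell against it by Manhattan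
-- distance (an alternative of similar cost, not claimed faster). Both Pythons mutate grid in place
-- identically; the equivalence proved here is about the returned grid (= the mutated object).

-- ===== PORT A =====
-- grid[i][j] (indices produced by range loops; in range under Pre_)
def pvCell (grid : List (List String)) (i j : Int) : String :=
  PySem.List.pyGetD (PySem.List.pyGetD grid i []) j ""

-- int(grid[i][j]) (the .getD 0 is unreachable: when isdigit holds, int() succeeds)
def pvPow (grid : List (List String)) (i j : Int) : Int :=
  (PySem.Int.ofStr? (pvCell grid i j)).getD 0

-- grid[p.1][p.2] = '.'
def pvSetCell (g : List (List String)) (p : Int × Int) : List (List String) :=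
  PySem.List.pySetD g p.1 (PySem.List.pySetD (PySem.List.pyGetD g p.1 []) p.2 ".")

def explode_bombs (row : Int) (col : Int) (grid : List (List String)) : List (List String) :=
  let toExplode : PySem.Set (Int × Int) :=
    (PySem.List.pyRange 0 row 1).foldl (fun s i =>
      (PySem.List.pyRange 0 col 1).foldl (fun s j =>
        if PySem.Str.strIsdigit (pvCell grid i j) then
          let power := pvPow grid i j
          (PySem.List.pyRange (-power) (power + 1) 1).foldl (fun s di =>
            (PySem.List.pyRange (|di| - power) (power - |di| + 1) 1).foldl (fun s dj =>
              if 0 ≤ i + di ∧ i + di < row ∧ 0 ≤ j + dj ∧ j + dj < col then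
                PySem.Set.add s (i + di, j + dj)
              else s) s) s
        else s) s) PySem.Set.empty
  -- iterating the set: the result (every listed cell set to '.') is order-independent
  toExplode.foldl pvSetCell grid

-- ===== PORT B =====
def explode_bombs_alt (row : Int) (col : Int) (grid : List (List String)) : List (List String) :=
  let bombs : List (Int × Int × Int) :=
    (PySem.List.pyRange 0 row 1).foldl (fun bs i =>
      (PySem.List.pyRange 0 col 1).foldl (fun bs j =>
        if PySem.Str.strIsdigit (pvCell grid i j) then
          bs ++ [(i, j, pvPow grid i j)]
        else bs) bs) []
  (PySem.List.pyRange 0 row 1).foldl (fun g i =>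
    (PySem.List.pyRange 0 col 1).foldl (fun g j =>
      if bombs.any (fun b => decide (|i - b.1| + |j - b.2.1| ≤ b.2.2)) then
        pvSetCell g (i, j)
      else g) g) grid

-- ===== PRECONDITION & SPEC =====
-- Exactly the inputs on which A returns: with positive row and col, A reads grid[i][j] for all
-- 0 ≤ i < row, 0 ≤ j < col (IndexError otherwise); with row ≤ 0 or col ≤ 0 it reads nothing.
def Pre_explode_bombs (row : Int) (col : Int) (grid : List (List String)) : Prop :=
  0 < row → 0 < col →
    (row ≤ (grid.length : Int) ∧ ∀ r ∈ grid.take row.toNat, col ≤ (r.length : Int))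
instance (row : Int) (col : Int) (grid : List (List String)) : Decidable (Pre_explode_bombs row col grid) := by unfold Pre_explode_bombs; infer_instance

def pvWitness_explode_bombs : Int × Int × List (List String) :=
  (2, 3, [["1", ".", "#"], [".", "#", "."]])

def Spec_explode_bombs (row : Int) (col : Int) (grid : List (List String)) (out : List (List String)) : Prop := out = explode_bombs_alt row col grid
instance (row : Int) (col : Int) (grid : List (List String)) (out : List (List String)) : Decidable (Spec_explode_bombs row col grid out) := by unfold Spec_explode_bombs; infer_instance

-- ===== CLAIM (what is proved, stated in full; the proofs are below) =====
def Claim_equal_explode_bombs : Prop := ∀ (row : Int) (col : Int) (grid : List (List String)), Dom_explode_bombs row col grid → Pre_explode_bombs row col grid → Spec_explode_bombs row col grid (explode_bombs row col grid)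

-- ===== LEMMAS AND PROOFS =====

-- names for the two intermediate structures the ports build (definitionally the ports' lets)
def pvSetA (row col : Int) (grid : List (List String)) : PySem.Set (Int × Int) :=
  (PySem.List.pyRange 0 row 1).foldl (fun s i =>
    (PySem.List.pyRange 0 col 1).foldl (fun s j =>
      if PySem.Str.strIsdigit (pvCell grid i j) then
        let power := pvPow grid i j
        (PySem.List.pyRange (-power) (power + 1) 1).foldl (fun s di =>
          (PySem.List.pyRange (|di| - power) (power - |di| + 1) 1).foldl (fun s dj =>
            if 0 ≤ i + di ∧ i + di < row ∧ 0 ≤ j + dj ∧ j + dj < col then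
              PySem.Set.add s (i + di, j + dj)
            else s) s) s
      else s) s) PySem.Set.empty

def pvBombs (row col : Int) (grid : List (List String)) : List (Int × Int × Int) :=
  (PySem.List.pyRange 0 row 1).foldl (fun bs i =>
    (PySem.List.pyRange 0 col 1).foldl (fun bs j =>
      if PySem.Str.strIsdigit (pvCell grid i j) then
        bs ++ [(i, j, pvPow grid i j)]
      else bs) bs) []

def pvHitTest (row col : Int) (grid : List (List String)) (i j : Int) : Bool :=
  (pvBombs row col grid).any (fun b => decide (|i - b.1| + |j - b.2.1| ≤ b.2.2))

def pvLB (row col : Int) (grid : List (List String)) : List (Int × Int) :=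
  (PySem.List.pyRange 0 row 1).flatMap (fun i =>
    ((PySem.List.pyRange 0 col 1).filter (fun j => pvHitTest row col grid i j)).map (fun j => (i, j)))

-- the cells both programs clear: in-bounds and within some bomb's diamond
def pvHit (row col : Int) (grid : List (List String)) (y : Int × Int) : Prop :=
  (0 ≤ y.1 ∧ y.1 < row ∧ 0 ≤ y.2 ∧ y.2 < col) ∧
    ∃ i j, (0 ≤ i ∧ i < row) ∧ (0 ≤ j ∧ j < col) ∧
      PySem.Str.strIsdigit (pvCell grid i j) = true ∧
      |y.1 - i| + |y.2 - j| ≤ pvPow grid i j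

def pvInR (g : List (List String)) (y : Int × Int) : Prop :=
  0 ≤ y.1 ∧ y.1 < (g.length : Int) ∧ 0 ≤ y.2 ∧ y.2 < ((g[y.1.toNat]?.getD []).length : Int)

theorem pv_A_eq (row col : Int) (grid : List (List String)) :
    explode_bombs row col grid = (pvSetA row col grid).foldl pvSetCell grid := rfl

theorem pv_B_eq (row col : Int) (grid : List (List String)) :
    explode_bombs_alt row col grid = (pvLB row col grid).foldl pvSetCell grid := by
  unfold explode_bombs_alt pvLB pvHitTest pvBombs
  rw [List.foldl_flatMap]
  apply PySem.List.foldl_congr_mem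
  intro acc i _
  rw [List.foldl_map, PySem.List.foldl_if_eq_foldl_filter]

-- membership through a fold of conditional Set.adds
theorem pv_mem_foldl {α β : Type} [BEq β] [LawfulBEq β] (y : β) (l : List α)
    (F : PySem.Set β → α → PySem.Set β) (Q : α → Prop) (s : PySem.Set β)
    (h : ∀ (s : PySem.Set β) (x : α), x ∈ l → (y ∈ F s x ↔ y ∈ s ∨ Q x)) :
    y ∈ l.foldl F s ↔ y ∈ s ∨ ∃ x ∈ l, Q x := by
  induction l generalizing s with
  | nil => simp
  | cons a t ih =>
    simp only [List.foldl_cons]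
    rw [ih _ (fun s x hx => h s x (List.mem_cons_of_mem a hx)),
        h s a List.mem_cons_self]
    simp only [List.mem_cons]
    constructor
    · rintro ((hs | hq) | ⟨x, hx, hq⟩)
      · exact Or.inl hs
      · exact Or.inr ⟨a, Or.inl rfl, hq⟩
      · exact Or.inr ⟨x, Or.inr hx, hq⟩
    · rintro (hs | ⟨x, hx | hx, hq⟩)
      · exact Or.inl (Or.inl hs)
      · exact Or.inl (Or.inr (hx ▸ hq))
      · exact Or.inr ⟨x, hx, hq⟩

-- the four nested loops of A, unwound level by level
theorem pv_mem_L1 (row col i j power di : Int) (s : PySem.Set (Int × Int)) (y : Int × Int) :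
    y ∈ (PySem.List.pyRange (|di| - power) (power - |di| + 1) 1).foldl (fun s dj =>
        if 0 ≤ i + di ∧ i + di < row ∧ 0 ≤ j + dj ∧ j + dj < col then
          PySem.Set.add s (i + di, j + dj)
        else s) s ↔
      y ∈ s ∨ ∃ dj, (|di| - power ≤ dj ∧ dj < power - |di| + 1) ∧
        (0 ≤ i + di ∧ i + di < row ∧ 0 ≤ j + dj ∧ j + dj < col) ∧ y = (i + di, j + dj) := by
  rw [pv_mem_foldl y _ _
      (fun dj => (0 ≤ i + di ∧ i + di < row ∧ 0 ≤ j + dj ∧ j + dj < col) ∧ y = (i + di, j + dj)) s ?_]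
  · simp only [PySem.List.mem_pyRange_one]
  · intro s dj _
    split_ifs with hc
    · rw [PySem.Set.mem_add]
      constructor
      · rintro (hs | rfl)
        · exact Or.inl hs
        · exact Or.inr ⟨hc, rfl⟩
      · rintro (hs | ⟨_, rfl⟩)
        · exact Or.inl hs
        · exact Or.inr rfl
    · constructor
      · exact Or.inl
      · rintro (hs | ⟨hc2, _⟩)
        · exact hs
        · exact absurd hc2 hc

theorem pv_mem_L2 (row col i j power : Int) (s : PySem.Set (Int × Int)) (y : Int × Int) :
    y ∈ (PySem.List.pyRange (-power) (power + 1) 1).foldl (fun s di =>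
        (PySem.List.pyRange (|di| - power) (power - |di| + 1) 1).foldl (fun s dj =>
          if 0 ≤ i + di ∧ i + di < row ∧ 0 ≤ j + dj ∧ j + dj < col then
            PySem.Set.add s (i + di, j + dj)
          else s) s) s ↔
      y ∈ s ∨ ∃ di, (-power ≤ di ∧ di < power + 1) ∧
        ∃ dj, (|di| - power ≤ dj ∧ dj < power - |di| + 1) ∧
          (0 ≤ i + di ∧ i + di < row ∧ 0 ≤ j + dj ∧ j + dj < col) ∧ y = (i + di, j + dj) := by
  rw [pv_mem_foldl y _ _
      (fun di => ∃ dj, (|di| - power ≤ dj ∧ dj < power - |di| + 1) ∧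
        (0 ≤ i + di ∧ i + di < row ∧ 0 ≤ j + dj ∧ j + dj < col) ∧ y = (i + di, j + dj)) s ?_]
  · simp only [PySem.List.mem_pyRange_one]
  · intro s di _
    exact pv_mem_L1 row col i j power di s y

theorem pv_mem_pvSetA (row col : Int) (grid : List (List String)) (y : Int × Int) :
    y ∈ pvSetA row col grid ↔
      ∃ i, (0 ≤ i ∧ i < row) ∧ ∃ j, (0 ≤ j ∧ j < col) ∧
        PySem.Str.strIsdigit (pvCell grid i j) = true ∧
        ∃ di, (-(pvPow grid i j) ≤ di ∧ di < pvPow grid i j + 1) ∧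
          ∃ dj, (|di| - pvPow grid i j ≤ dj ∧ dj < pvPow grid i j - |di| + 1) ∧
            (0 ≤ i + di ∧ i + di < row ∧ 0 ≤ j + dj ∧ j + dj < col) ∧ y = (i + di, j + dj) := by
  unfold pvSetA
  rw [pv_mem_foldl y _ _
      (fun i => ∃ j, (0 ≤ j ∧ j < col) ∧
        PySem.Str.strIsdigit (pvCell grid i j) = true ∧
        ∃ di, (-(pvPow grid i j) ≤ di ∧ di < pvPow grid i j + 1) ∧
          ∃ dj, (|di| - pvPow grid i j ≤ dj ∧ dj < pvPow grid i j - |di| + 1) ∧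
            (0 ≤ i + di ∧ i + di < row ∧ 0 ≤ j + dj ∧ j + dj < col) ∧ y = (i + di, j + dj)) _ ?_]
  · simp only [PySem.List.mem_pyRange_one, PySem.Set.empty]
    simp
  · intro s i _
    rw [pv_mem_foldl y _ _
        (fun j => PySem.Str.strIsdigit (pvCell grid i j) = true ∧
          ∃ di, (-(pvPow grid i j) ≤ di ∧ di < pvPow grid i j + 1) ∧
            ∃ dj, (|di| - pvPow grid i j ≤ dj ∧ dj < pvPow grid i j - |di| + 1) ∧
              (0 ≤ i + di ∧ i + di < row ∧ 0 ≤ j + dj ∧ j + dj < col) ∧ y = (i + di, j + dj)) s ?_]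
    · simp only [PySem.List.mem_pyRange_one]
    · intro s j _
      split_ifs with hd
      · rw [pv_mem_L2 row col i j (pvPow grid i j) s y]
        constructor
        · rintro (hs | hq)
          · exact Or.inl hs
          · exact Or.inr ⟨hd, hq⟩
        · rintro (hs | ⟨_, hq⟩)
          · exact Or.inl hs
          · exact Or.inr hq
      · constructor
        · exact Or.inl
        · rintro (hs | ⟨hd2, _⟩)
          · exact hs
          · exact absurd hd2 hd

theorem pv_setA_iff_hit (row col : Int) (grid : List (List String)) (y : Int × Int) :
    y ∈ pvSetA row col grid ↔ pvHit row col grid y := by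
  rw [pv_mem_pvSetA]
  unfold pvHit
  constructor
  · rintro ⟨i, hi, j, hj, hd, di, hdi, dj, hdj, hin, rfl⟩
    refine ⟨by simpa using hin, i, j, hi, hj, hd, ?_⟩
    simp only [Int.abs_eq_natAbs] at *
    omega
  · rintro ⟨⟨h1, h2, h3, h4⟩, i, j, hi, hj, hd, hle⟩
    refine ⟨i, hi, j, hj, hd, y.1 - i, ?_, y.2 - j, ?_, ?_, ?_⟩
    · simp only [Int.abs_eq_natAbs] at *; omega
    · simp only [Int.abs_eq_natAbs] at *; omega
    · omega
    · ext <;> simp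

-- membership in the bombs table
theorem pv_mem_pvBombs (row col : Int) (grid : List (List String)) (b : Int × Int × Int) :
    b ∈ pvBombs row col grid ↔
      ∃ i j, (0 ≤ i ∧ i < row) ∧ (0 ≤ j ∧ j < col) ∧
        PySem.Str.strIsdigit (pvCell grid i j) = true ∧ b = (i, j, pvPow grid i j) := by
  unfold pvBombs
  simp only [PySem.List.foldl_append_if]
  rw [PySem.List.foldl_append_eq_flatMap]
  simp only [List.nil_append, List.mem_flatMap, List.mem_map, List.mem_filter,
    PySem.List.mem_pyRange_one]
  constructor
  · rintro ⟨i, hi, j, ⟨hj, hd⟩, rfl⟩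
    exact ⟨i, j, hi, hj, hd, rfl⟩
  · rintro ⟨i, j, hi, hj, hd, rfl⟩
    exact ⟨i, hi, j, ⟨hj, hd⟩, rfl⟩

-- membership in B's cleared-cell list
theorem pv_mem_pvLB (row col : Int) (grid : List (List String)) (y : Int × Int) :
    y ∈ pvLB row col grid ↔ pvHit row col grid y := by
  unfold pvLB pvHitTest pvHit
  simp only [List.mem_flatMap, List.mem_map, List.mem_filter, PySem.List.mem_pyRange_one,
    List.any_eq_true, decide_eq_true_eq]
  constructor
  · rintro ⟨i, hi, j, ⟨hj, b, hb, hle⟩, rfl⟩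
    rw [pv_mem_pvBombs] at hb
    obtain ⟨bi, bj, hbi, hbj, hd, rfl⟩ := hb
    exact ⟨⟨hi.1, hi.2, hj.1, hj.2⟩, bi, bj, hbi, hbj, hd, hle⟩
  · rintro ⟨⟨h1, h2, h3, h4⟩, bi, bj, hbi, hbj, hd, hle⟩
    refine ⟨y.1, ⟨h1, h2⟩, y.2, ⟨⟨h3, h4⟩, (bi, bj, pvPow grid bi bj), ?_, hle⟩, rfl⟩
    rw [pv_mem_pvBombs]
    exact ⟨bi, bj, hbi, hbj, hd, rfl⟩

-- ===== the update fold: pointwise description =====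
theorem pv_setCell_eq (g : List (List String)) (p : Int × Int) (h1 : 0 ≤ p.1) (h3 : 0 ≤ p.2) :
    pvSetCell g p = g.set p.1.toNat ((g[p.1.toNat]?.getD []).set p.2.toNat ".") := by
  unfold pvSetCell
  rw [PySem.List.pyGetD_of_nonneg _ _ h1, PySem.List.pySetD_of_nonneg _ _ h3,
    PySem.List.pySetD_of_nonneg _ _ h1, List.getD_eq_getElem?_getD]

theorem pv_length_setCell (g : List (List String)) (p : Int × Int) :
    (pvSetCell g p).length = g.length := by
  unfold pvSetCell
  rw [PySem.List.length_pySetD]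

theorem pv_rowlen_setCell (g : List (List String)) (p : Int × Int) (h1 : 0 ≤ p.1) (h3 : 0 ≤ p.2)
    (m : Nat) : ((pvSetCell g p)[m]?.getD []).length = ((g[m]?.getD []).length) := by
  rw [pv_setCell_eq g p h1 h3]
  rw [List.getElem?_set]
  split_ifs with he hl
  · simp [← he, List.length_set]
  · have hnone : g[m]? = none := List.getElem?_eq_none (by omega)
    simp [hnone]
  · rfl

theorem pv_length_foldl (L : List (Int × Int)) (g : List (List String)) :
    (L.foldl pvSetCell g).length = g.length := by
  induction L generalizing g with
  | nil => rfl
  | cons p t ih => rw [List.foldl_cons, ih, pv_length_setCell]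

theorem pv_rowlen_foldl (L : List (Int × Int)) (g : List (List String))
    (H : ∀ y ∈ L, 0 ≤ y.1 ∧ 0 ≤ y.2) (m : Nat) :
    ((L.foldl pvSetCell g)[m]?.getD []).length = ((g[m]?.getD []).length) := by
  induction L generalizing g with
  | nil => rfl
  | cons p t ih =>
    obtain ⟨h1, h3⟩ := H p List.mem_cons_self
    rw [List.foldl_cons, ih _ (fun y hy => H y (List.mem_cons_of_mem p hy)),
      pv_rowlen_setCell g p h1 h3]

theorem pv_cell_foldl (L : List (Int × Int)) (g : List (List String))
    (H : ∀ y ∈ L, pvInR g y) (m n : Nat) :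
    ((L.foldl pvSetCell g)[m]?.getD [])[n]?.getD "" =
      if ((m : Int), (n : Int)) ∈ L then "." else (g[m]?.getD [])[n]?.getD "" := by
  induction L generalizing g with
  | nil => simp
  | cons p t ih =>
    obtain ⟨h1, h2, h3, h4⟩ := H p List.mem_cons_self
    have H' : ∀ y ∈ t, pvInR (pvSetCell g p) y := by
      intro y hy
      obtain ⟨k1, k2, k3, k4⟩ := H y (List.mem_cons_of_mem p hy)
      refine ⟨k1, ?_, k3, ?_⟩
      · rwa [pv_length_setCell]
      · rwa [pv_rowlen_setCell g p h1 h3]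
    rw [List.foldl_cons, ih _ H']
    by_cases hmem : ((m : Int), (n : Int)) ∈ t
    · simp [hmem, List.mem_cons]
    · simp only [hmem, if_false, List.mem_cons, or_false]
      rw [pv_setCell_eq g p h1 h3]
      rw [List.getElem?_set]
      by_cases hpm : ((m : Int), (n : Int)) = p
      · have hm1 : p.1.toNat = m := by
          have : p.1 = (m : Int) := by rw [← hpm]
          omega
        have hn1 : p.2.toNat = n := by
          have : p.2 = (n : Int) := by rw [← hpm]
          omega
        have hmlt : m < g.length := by omega
        simp only [hm1, hmlt, if_true, hpm]
        simp only [Option.getD_some]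
        rw [List.getElem?_set]
        have hnlt : n < (g[m]?.getD []).length := by
          rw [← hm1] at *
          omega
        simp [hn1, hnlt]
      · simp only [hpm, if_false]
        rcases eq_or_ne p.1.toNat m with he | he
        · -- same row, different column (or p out of that row): p.2.toNat ≠ n
          have hne : p.2.toNat ≠ n ∨ p.1 ≠ (m : Int) := by
            by_cases hq : p.1 = (m : Int)
            · left
              intro hc
              apply hpm
              have : p.2 = (n : Int) := by omega
              rw [Prod.ext_iff]
              exact ⟨hq.symm, this.symm⟩
            · right; exact hq
          have hp1m : p.1 = (m : Int) := by omega
          rcases hne with hne | hne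
          · simp only [he, if_true]
            split_ifs with hl
            · simp only [Option.getD_some]
              rw [List.getElem?_set]
              simp [hne]
            · -- m ≥ g.length contradicts h2 + he
              exfalso; omega
          · exact absurd hp1m hne
        · simp [he]

theorem pv_foldl_setCell_ext (L1 L2 : List (Int × Int)) (g : List (List String))
    (hmem : ∀ y, y ∈ L1 ↔ y ∈ L2) (H : ∀ y ∈ L1, pvInR g y) :
    L1.foldl pvSetCell g = L2.foldl pvSetCell g := by
  have H2 : ∀ y ∈ L2, pvInR g y := fun y hy => H y ((hmem y).2 hy)
  have hlen : (L1.foldl pvSetCell g).length = (L2.foldl pvSetCell g).length := by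
    rw [pv_length_foldl, pv_length_foldl]
  apply List.ext_getElem hlen
  intro m hm1 hm2
  have hrl : ((L1.foldl pvSetCell g)[m]?.getD []).length =
      ((L2.foldl pvSetCell g)[m]?.getD []).length := by
    rw [pv_rowlen_foldl L1 g (fun y hy => ⟨(H y hy).1, (H y hy).2.2.1⟩) m,
      pv_rowlen_foldl L2 g (fun y hy => ⟨(H2 y hy).1, (H2 y hy).2.2.1⟩) m]
  have hrow : (L1.foldl pvSetCell g)[m]?.getD [] = (L2.foldl pvSetCell g)[m]?.getD [] := by
    apply List.ext_getElem hrl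
    intro n hn1 hn2
    have c1 := pv_cell_foldl L1 g H m n
    have c2 := pv_cell_foldl L2 g H2 m n
    rw [if_congr (hmem ((m : Int), (n : Int))) rfl rfl] at c1
    have : ((L1.foldl pvSetCell g)[m]?.getD [])[n]?.getD "" =
        ((L2.foldl pvSetCell g)[m]?.getD [])[n]?.getD "" := by rw [c1, c2]
    simpa [List.getElem?_eq_getElem, hn1, hn2] using this
  have e1 : (L1.foldl pvSetCell g)[m]?.getD [] = (L1.foldl pvSetCell g)[m] := by
    simp [hm1]
  have e2 : (L2.foldl pvSetCell g)[m]?.getD [] = (L2.foldl pvSetCell g)[m] := by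
    simp [hm2]
  rw [← e1, ← e2, hrow]

-- ===== VERDICT (by name: the statement is the Claim_ definition above) =====
theorem explode_bombs_spec : Claim_equal_explode_bombs := by
  intro row col grid _ hpre
  unfold Spec_explode_bombs
  rw [pv_A_eq, pv_B_eq]
  apply pv_foldl_setCell_ext
  · intro y
    rw [pv_setA_iff_hit, pv_mem_pvLB]
  · intro y hy
    rw [pv_setA_iff_hit] at hy
    obtain ⟨⟨h1, h2, h3, h4⟩, _⟩ := hy
    obtain ⟨hrow, hcol⟩ := hpre (by omega) (by omega)
    have hlt : y.1.toNat < grid.length := by omega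
    refine ⟨h1, by omega, h3, ?_⟩
    have hmem : grid[y.1.toNat]?.getD [] ∈ grid.take row.toNat := by
      have : (grid.take row.toNat)[y.1.toNat]? = grid[y.1.toNat]? := by
        rw [List.getElem?_take, if_pos (by omega)]
      have hx : grid[y.1.toNat]? = some grid[y.1.toNat] := by
        simp [hlt]
      rw [hx]
      simp only [Option.getD_some]
      apply List.mem_of_getElem?
      rw [this, hx]
    have := hcol _ hmem
    omega
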